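-- pv_equiv track=rewrite | github.com/EvgenijGod/HSE | AaDS/Merge/UnionSequence.py | seqEl
-- ===== SOURCE A (Python) =====
-- def seqEl(x):
--     i = 1
--     j = 1
--     el = 0
--     for cnt in range(x):
--         if i ** 2 < j ** 3:
--             el = i ** 2
--             i += 1
--         elif j ** 3 < i ** 2:
--             el = j ** 3
--             j += 1
--         else:
--             el = i ** 2
--             i += 1
--             j += 1
--     return el
-- ===== SOURCE B (Python) =====
-- def seqEl(x):
--     # binary search on value: count(v) = #squares<=v + #cubes<=v - #sixth powers<=v
--     if x <= 0:
--         return 0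
--
--     def isqrt(v):
--         lo, hi = 0, v + 1
--         while hi - lo > 1:
--             mid = (lo + hi) // 2
--             if mid * mid <= v:
--                 lo = mid
--             else:
--                 hi = mid
--         return lo
--
--     def icbrt(v):
--         lo, hi = 0, v + 1
--         while hi - lo > 1:
--             mid = (lo + hi) // 2
--             if mid * mid * mid <= v:
--                 lo = mid
--             else:
--                 hi = mid
--         return lo
--
--     def count(v):
--         c = icbrt(v)
--         return isqrt(v) + c - isqrt(c)
--
--     lo, hi = 0, x * x
--     while hi - lo > 1:
--         mid = (lo + hi) // 2
--         if count(mid) >= x: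
--             hi = mid
--         else:
--             lo = mid
--     return hi
-- ===== Notes on version B (the rewrite author's own statement) =====
-- stated objective: faster
-- what changed: Replaces A's step-by-step merge of the square and cube streams (x loop iterations) by a binary search on the answer value using the inclusion-exclusion count isqrt(v)+icbrt(v)-isqrt(icbrt(v)), with hand-written integer-root binary searches.
import Mathlib
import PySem

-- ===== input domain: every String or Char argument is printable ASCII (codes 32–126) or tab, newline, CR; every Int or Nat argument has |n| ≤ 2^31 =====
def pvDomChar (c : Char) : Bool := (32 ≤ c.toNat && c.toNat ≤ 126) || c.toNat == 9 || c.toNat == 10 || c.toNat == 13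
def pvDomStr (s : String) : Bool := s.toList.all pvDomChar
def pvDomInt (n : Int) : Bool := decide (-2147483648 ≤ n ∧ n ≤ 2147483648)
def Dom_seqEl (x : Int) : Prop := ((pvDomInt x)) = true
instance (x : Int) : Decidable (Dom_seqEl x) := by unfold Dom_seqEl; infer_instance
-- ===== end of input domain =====

-- B replaces A's O(x) merge of the square and cube streams by a binary search on the
-- value with the inclusion–exclusion count isqrt(v)+icbrt(v)-isixthroot(v); same return value.

-- ===== PORT A =====
-- A's loop body (state (i, j, el)); faithful step of the for-loop over range(x)
def stepA (s : Int × Int × Int) (_cnt : Int) : Int × Int × Int :=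
  if s.1 ^ 2 < s.2.1 ^ 3 then (s.1 + 1, s.2.1, s.1 ^ 2)
  else if s.2.1 ^ 3 < s.1 ^ 2 then (s.1, s.2.1 + 1, s.2.1 ^ 3)
  else (s.1 + 1, s.2.1 + 1, s.1 ^ 2)

def seqEl (x : Int) : Int :=
  ((PySem.List.pyRange 0 x 1).foldl stepA (1, 1, 0)).2.2

-- ===== PORT B =====
-- after the x ≤ 0 guard every Python int in Source B is nonnegative and hi ≥ lo holds at
-- every '-' and '//', so Nat subtraction and Nat division model them exactly.
def altIsqrtLoop (v lo hi : Nat) : Nat :=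
  if 1 < hi - lo then
    let mid := (lo + hi) / 2
    if mid * mid ≤ v then altIsqrtLoop v mid hi else altIsqrtLoop v lo mid
  else lo
termination_by hi - lo
decreasing_by all_goals omega

def altIsqrt (v : Nat) : Nat := altIsqrtLoop v 0 (v + 1)

def altIcbrtLoop (v lo hi : Nat) : Nat :=
  if 1 < hi - lo then
    let mid := (lo + hi) / 2
    if mid * mid * mid ≤ v then altIcbrtLoop v mid hi else altIcbrtLoop v lo mid
  else lo
termination_by hi - lo
decreasing_by all_goals omega

def altIcbrt (v : Nat) : Nat := altIcbrtLoop v 0 (v + 1)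

def altCount (v : Nat) : Nat :=
  let c := altIcbrt v
  altIsqrt v + c - altIsqrt c

def altMainLoop (n lo hi : Nat) : Nat :=
  if 1 < hi - lo then
    let mid := (lo + hi) / 2
    if n ≤ altCount mid then altMainLoop n lo mid else altMainLoop n mid hi
  else hi
termination_by hi - lo
decreasing_by all_goals omega

def seqEl_alt (x : Int) : Int :=
  if x ≤ 0 then 0
  else ((altMainLoop x.toNat 0 (x.toNat * x.toNat) : Nat) : Int)

-- ===== PRECONDITION & SPEC =====
def Spec_seqEl (x : Int) (out : Int) : Prop := out = seqEl_alt x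
instance (x : Int) (out : Int) : Decidable (Spec_seqEl x out) := by unfold Spec_seqEl; infer_instance

-- ===== CLAIM (what is proved, stated in full; the proofs are below) =====
def Claim_equal_seqEl : Prop := ∀ (x : Int), Dom_seqEl x → Spec_seqEl x (seqEl x)

-- ===== LEMMAS AND PROOFS =====

-- ---- binary-search loop specifications ----
theorem altIsqrtLoop_spec (k : Nat) : ∀ v lo hi : Nat, hi - lo ≤ k →
    lo * lo ≤ v → v < hi * hi → lo < hi →
    altIsqrtLoop v lo hi * altIsqrtLoop v lo hi ≤ v ∧
      v < (altIsqrtLoop v lo hi + 1) * (altIsqrtLoop v lo hi + 1) := by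
  induction k with
  | zero => intro v lo hi hk _ _ hlt; omega
  | succ k ih =>
    intro v lo hi hk h1 h2 hlt
    rw [altIsqrtLoop]
    by_cases h : 1 < hi - lo
    · simp only [if_pos h]
      have hmid1 : lo < (lo + hi) / 2 := by omega
      have hmid2 : (lo + hi) / 2 < hi := by omega
      by_cases hle : (lo + hi) / 2 * ((lo + hi) / 2) ≤ v
      · simp only [if_pos hle]
        exact ih v _ hi (by omega) hle h2 hmid2
      · simp only [if_neg hle]
        exact ih v lo _ (by omega) h1 (by omega) hmid1
    · simp only [if_neg h]
      have : hi = lo + 1 := by omega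
      subst this
      exact ⟨h1, h2⟩

theorem altIsqrt_char (v : Nat) :
    altIsqrt v * altIsqrt v ≤ v ∧ v < (altIsqrt v + 1) * (altIsqrt v + 1) := by
  have := altIsqrtLoop_spec (v + 1) v 0 (v + 1) (by omega) (by omega) (by nlinarith) (by omega)
  exact this

theorem altIcbrtLoop_spec (k : Nat) : ∀ v lo hi : Nat, hi - lo ≤ k →
    lo * lo * lo ≤ v → v < hi * hi * hi → lo < hi →
    altIcbrtLoop v lo hi * altIcbrtLoop v lo hi * altIcbrtLoop v lo hi ≤ v ∧
      v < (altIcbrtLoop v lo hi + 1) * (altIcbrtLoop v lo hi + 1) * (altIcbrtLoop v lo hi + 1) := by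
  induction k with
  | zero => intro v lo hi hk _ _ hlt; omega
  | succ k ih =>
    intro v lo hi hk h1 h2 hlt
    rw [altIcbrtLoop]
    by_cases h : 1 < hi - lo
    · simp only [if_pos h]
      have hmid1 : lo < (lo + hi) / 2 := by omega
      have hmid2 : (lo + hi) / 2 < hi := by omega
      by_cases hle : (lo + hi) / 2 * ((lo + hi) / 2) * ((lo + hi) / 2) ≤ v
      · simp only [if_pos hle]
        exact ih v _ hi (by omega) hle h2 hmid2
      · simp only [if_neg hle]
        exact ih v lo _ (by omega) h1 (by omega) hmid1
    · simp only [if_neg h]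
      have : hi = lo + 1 := by omega
      subst this
      exact ⟨h1, h2⟩

theorem altIcbrt_char (v : Nat) :
    altIcbrt v * altIcbrt v * altIcbrt v ≤ v ∧
      v < (altIcbrt v + 1) * (altIcbrt v + 1) * (altIcbrt v + 1) := by
  have := altIcbrtLoop_spec (v + 1) v 0 (v + 1) (by omega) (by omega) (by nlinarith) (by omega)
  exact this

-- uniqueness of the floor root from its characterization
theorem sq_root_unique {r s v : Nat} (h1 : r * r ≤ v) (h2 : v < (r + 1) * (r + 1))
    (h3 : s * s ≤ v) (h4 : v < (s + 1) * (s + 1)) : r = s := by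
  rcases Nat.lt_trichotomy r s with h | h | h
  · have : (r + 1) * (r + 1) ≤ s * s := Nat.mul_le_mul h h
    omega
  · exact h
  · have : (s + 1) * (s + 1) ≤ r * r := Nat.mul_le_mul h h
    omega

theorem cb_root_unique {r s v : Nat} (h1 : r * r * r ≤ v) (h2 : v < (r + 1) * (r + 1) * (r + 1))
    (h3 : s * s * s ≤ v) (h4 : v < (s + 1) * (s + 1) * (s + 1)) : r = s := by
  rcases Nat.lt_trichotomy r s with h | h | h
  · have : (r + 1) * (r + 1) * (r + 1) ≤ s * s * s := Nat.mul_le_mul (Nat.mul_le_mul h h) h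
    omega
  · exact h
  · have : (s + 1) * (s + 1) * (s + 1) ≤ r * r * r := Nat.mul_le_mul (Nat.mul_le_mul h h) h
    omega

theorem altIsqrt_eq {v r : Nat} (h1 : r * r ≤ v) (h2 : v < (r + 1) * (r + 1)) :
    altIsqrt v = r :=
  sq_root_unique (altIsqrt_char v).1 (altIsqrt_char v).2 h1 h2

theorem altIcbrt_eq {v r : Nat} (h1 : r * r * r ≤ v) (h2 : v < (r + 1) * (r + 1) * (r + 1)) :
    altIcbrt v = r :=
  cb_root_unique (altIcbrt_char v).1 (altIcbrt_char v).2 h1 h2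

theorem altIsqrt_le_self (v : Nat) : altIsqrt v ≤ v := by
  have h := (altIsqrt_char v).1
  nlinarith [Nat.le_refl (altIsqrt v)]

theorem altIsqrt_mono {v w : Nat} (h : v ≤ w) : altIsqrt v ≤ altIsqrt w := by
  by_contra hc
  push Not at hc
  have h1 : altIsqrt w + 1 ≤ altIsqrt v := hc
  have := Nat.mul_le_mul h1 h1
  have h2 := (altIsqrt_char v).1
  have h3 := (altIsqrt_char w).2
  omega

theorem altIcbrt_mono {v w : Nat} (h : v ≤ w) : altIcbrt v ≤ altIcbrt w := by
  by_contra hc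
  push Not at hc
  have h1 : altIcbrt w + 1 ≤ altIcbrt v := hc
  have := Nat.mul_le_mul (Nat.mul_le_mul h1 h1) h1
  have h2 := (altIcbrt_char v).1
  have h3 := (altIcbrt_char w).2
  omega

theorem altIsqrt_succ_le (v : Nat) : altIsqrt (v + 1) ≤ altIsqrt v + 1 := by
  by_contra hc
  push Not at hc
  have h1 : altIsqrt v + 2 ≤ altIsqrt (v + 1) := hc
  have := Nat.mul_le_mul h1 h1
  have h2 := (altIsqrt_char (v + 1)).1
  have h3 := (altIsqrt_char v).2
  nlinarith


-- ---- the counting function: value and monotonicity ----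
theorem altCount_eq {v i j : Nat} (hi : 1 ≤ i) (_hj : 1 ≤ j)
    (h1 : (i - 1) * (i - 1) ≤ v) (h2 : v < i * i)
    (h3 : (j - 1) * (j - 1) * (j - 1) ≤ v) (h4 : v < j * j * j) :
    altCount v = (i - 1) + (j - 1) - altIsqrt (j - 1) := by
  have e1 : i - 1 + 1 = i := by omega
  have e2 : j - 1 + 1 = j := by omega
  have hs : altIsqrt v = i - 1 := altIsqrt_eq h1 (by rw [e1]; exact h2)
  have hc : altIcbrt v = j - 1 := altIcbrt_eq h3 (by rw [e2]; exact h4)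
  simp only [altCount, hs, hc]

theorem altCount_mono {v w : Nat} (h : v ≤ w) : altCount v ≤ altCount w := by
  have hg : ∀ c c' : Nat, c ≤ c' → c - altIsqrt c ≤ c' - altIsqrt c' := by
    intro c c' hcc
    induction c' with
    | zero => omega
    | succ c' ih =>
      rcases Nat.lt_or_ge c (c' + 1) with hlt | hge
      · have h1 := ih (by omega)
        have h2 := altIsqrt_succ_le c'
        have h3 := altIsqrt_le_self c'
        omega
      · have hce : c = c' + 1 := by omega
        rw [hce]
  have h1 := altIsqrt_mono h
  have h2 := altIcbrt_mono h
  have h3 := hg _ _ h2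
  have h4 := altIsqrt_le_self (altIcbrt v)
  have h5 := altIsqrt_le_self (altIcbrt w)
  simp only [altCount]
  omega

-- ---- a number that is both a square and a cube is a sixth power ----
theorem sq_eq_cube {i j : Nat} (hi : 1 ≤ i) (_hj : 1 ≤ j) (h : i * i = j * j * j) :
    ∃ c : Nat, 1 ≤ c ∧ j = c * c ∧ i = c * c * c := by
  have hd0 : 0 < Nat.gcd i j := Nat.gcd_pos_of_pos_left j (by omega)
  have cop : Nat.Coprime (i / Nat.gcd i j) (j / Nat.gcd i j) := Nat.coprime_div_gcd_div_gcd hd0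
  set d := Nat.gcd i j with hd
  set a := i / d with hadef
  set b := j / d with hbdef
  have ha : i = d * a := (Nat.mul_div_cancel' (Nat.gcd_dvd_left i j)).symm
  have hb : j = d * b := (Nat.mul_div_cancel' (Nat.gcd_dvd_right i j)).symm
  have key : a * a = d * (b * b * b) := by
    have h' : d * d * (a * a) = d * d * (d * (b * b * b)) := by
      rw [ha, hb] at h; ring_nf at h ⊢; nlinarith [h]
    exact Nat.eq_of_mul_eq_mul_left (by positivity) h'
  have hdvd : b * b * b ∣ a * a := ⟨d, by rw [key]; ring⟩
  have copb : Nat.Coprime (b * b * b) (a * a) := by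
    have hp : Nat.Coprime (b ^ 3) (a ^ 2) := Nat.Coprime.pow _ _ cop.symm
    have e1 : b ^ 3 = b * b * b := by ring
    have e2 : a ^ 2 = a * a := by ring
    rwa [e1, e2] at hp
  have hb1 : b * b * b = 1 := Nat.Coprime.eq_one_of_dvd copb hdvd
  have hbone : b = 1 := by nlinarith
  have hda : a * a = d := by rw [hbone] at key; simpa using key
  have ha1 : 1 ≤ a := by
    rcases Nat.eq_zero_or_pos a with h0 | h1
    · rw [h0, Nat.mul_zero] at ha; omega
    · exact h1
  refine ⟨a, ha1, ?_, ?_⟩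
  · rw [hb, hbone, Nat.mul_one]; exact hda.symm
  · rw [ha, ← hda]

-- ---- Nat-level model of A's loop ----
def stepN (s : Nat × Nat × Nat) : Nat × Nat × Nat :=
  if s.1 * s.1 < s.2.1 * s.2.1 * s.2.1 then (s.1 + 1, s.2.1, s.1 * s.1)
  else if s.2.1 * s.2.1 * s.2.1 < s.1 * s.1 then (s.1, s.2.1 + 1, s.2.1 * s.2.1 * s.2.1)
  else (s.1 + 1, s.2.1 + 1, s.1 * s.1)

def iterN : Nat → Nat × Nat × Nat
  | 0 => (1, 1, 0)
  | n + 1 => stepN (iterN n)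

-- the loop invariant of A's merge
def InvA (n : Nat) (s : Nat × Nat × Nat) : Prop :=
  1 ≤ s.1 ∧ 1 ≤ s.2.1 ∧
  (s.1 - 1) * (s.1 - 1) ≤ s.2.2 ∧ s.2.2 < s.1 * s.1 ∧
  (s.2.1 - 1) * (s.2.1 - 1) * (s.2.1 - 1) ≤ s.2.2 ∧ s.2.2 < s.2.1 * s.2.1 * s.2.1 ∧
  n + altIsqrt (s.2.1 - 1) = (s.1 - 1) + (s.2.1 - 1) ∧
  ((n = 0 ∧ s.2.2 = 0) ∨ (1 ≤ s.2.2 ∧ altCount (s.2.2 - 1) + 1 = n))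

theorem invA_zero : InvA 0 (iterN 0) := by
  have h0 : altIsqrt 0 = 0 := altIsqrt_eq (by omega) (by omega)
  simp [InvA, iterN, h0]

theorem lt_of_mul_self_lt {x y : Nat} (h : x * x < y * y) : x < y := by
  by_contra hc
  push Not at hc
  have := Nat.mul_le_mul hc hc
  omega

theorem invA_step {n : Nat} {s : Nat × Nat × Nat} (h : InvA n s) : InvA (n + 1) (stepN s) := by
  obtain ⟨i, j, el⟩ := s
  obtain ⟨hi, hj, hs1, hs2, hc1, hc2, heq, _⟩ := h
  simp only at hi hj hs1 hs2 hc1 hc2 heq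
  obtain ⟨a, rfl⟩ : ∃ a, i = a + 1 := ⟨i - 1, by omega⟩
  obtain ⟨b, rfl⟩ : ∃ b, j = b + 1 := ⟨j - 1, by omega⟩
  simp only [Nat.add_sub_cancel] at hs1 hc1 heq
  have hsle : altIsqrt b ≤ b := altIsqrt_le_self b
  have ea : (a + 1) * (a + 1) = a * a + 2 * a + 1 := by ring
  have eb : (b + 1) * (b + 1) * (b + 1) = b * b * b + 3 * (b * b) + 3 * b + 1 := by ring
  rcases Nat.lt_trichotomy ((a + 1) * (a + 1)) ((b + 1) * (b + 1) * (b + 1)) with hlt | heq2 | hgt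
  · -- square branch
    have hstep : stepN (a + 1, b + 1, el) = (a + 1 + 1, b + 1, (a + 1) * (a + 1)) := by
      simp [stepN, hlt]
    rw [hstep]
    have hprev : altCount ((a + 1) * (a + 1) - 1) = n := by
      have e := altCount_eq (v := (a + 1) * (a + 1) - 1) (i := a + 1) (j := b + 1) (by omega) (by omega)
        (by simp only [Nat.add_sub_cancel]; omega) (by omega)
        (by simp only [Nat.add_sub_cancel]; omega) (by omega)
      simp only [Nat.add_sub_cancel] at e
      omega
    refine ⟨?_, ?_, ?_, ?_, ?_, ?_, ?_, Or.inr ⟨?_, ?_⟩⟩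
    · show 1 ≤ a + 1 + 1; omega
    · show 1 ≤ b + 1; omega
    · show (a + 1) * (a + 1) ≤ (a + 1) * (a + 1); exact Nat.le_refl _
    · show (a + 1) * (a + 1) < (a + 1 + 1) * (a + 1 + 1)
      have : (a + 1 + 1) * (a + 1 + 1) = (a + 1) * (a + 1) + 2 * (a + 1) + 1 := by ring
      omega
    · show b * b * b ≤ (a + 1) * (a + 1); omega
    · show (a + 1) * (a + 1) < (b + 1) * (b + 1) * (b + 1); exact hlt
    · show n + 1 + altIsqrt b = a + 1 + b; omega
    · show 1 ≤ (a + 1) * (a + 1); omega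
    · show altCount ((a + 1) * (a + 1) - 1) + 1 = n + 1; omega
  · -- equal branch: advance both
    have hstep : stepN (a + 1, b + 1, el) = (a + 1 + 1, b + 1 + 1, (a + 1) * (a + 1)) := by
      simp [stepN, heq2]
    rw [hstep]
    obtain ⟨c, hc, hjc, hic⟩ := sq_eq_cube (i := a + 1) (j := b + 1) (by omega) (by omega) heq2
    obtain ⟨m, rfl⟩ : ∃ m, c = m + 1 := ⟨c - 1, by omega⟩
    have em : (m + 1) * (m + 1) = m * m + 2 * m + 1 := by ring
    have em2 : (m + 2) * (m + 2) = m * m + 4 * m + 4 := by ring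
    have hsq1 : altIsqrt b = m := altIsqrt_eq (by omega) (by omega)
    have hsq2 : altIsqrt (b + 1) = m + 1 := by
      apply altIsqrt_eq
      · omega
      · show b + 1 < (m + 1 + 1) * (m + 1 + 1)
        have : (m + 1 + 1) * (m + 1 + 1) = m * m + 4 * m + 4 := by ring
        omega
    have hprev : altCount ((a + 1) * (a + 1) - 1) = n := by
      have e := altCount_eq (v := (a + 1) * (a + 1) - 1) (i := a + 1) (j := b + 1) (by omega) (by omega)
        (by simp only [Nat.add_sub_cancel]; omega) (by omega)
        (by simp only [Nat.add_sub_cancel]; omega) (by omega)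
      simp only [Nat.add_sub_cancel] at e
      omega
    refine ⟨?_, ?_, ?_, ?_, ?_, ?_, ?_, Or.inr ⟨?_, ?_⟩⟩
    · show 1 ≤ a + 1 + 1; omega
    · show 1 ≤ b + 1 + 1; omega
    · show (a + 1) * (a + 1) ≤ (a + 1) * (a + 1); exact Nat.le_refl _
    · show (a + 1) * (a + 1) < (a + 1 + 1) * (a + 1 + 1)
      have : (a + 1 + 1) * (a + 1 + 1) = (a + 1) * (a + 1) + 2 * (a + 1) + 1 := by ring
      omega
    · show (b + 1) * (b + 1) * (b + 1) ≤ (a + 1) * (a + 1); omega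
    · show (a + 1) * (a + 1) < (b + 1 + 1) * (b + 1 + 1) * (b + 1 + 1)
      have : (b + 1 + 1) * (b + 1 + 1) * (b + 1 + 1)
          = (b + 1) * (b + 1) * (b + 1) + 3 * ((b + 1) * (b + 1)) + 3 * (b + 1) + 1 := by ring
      omega
    · show n + 1 + altIsqrt (b + 1) = a + 1 + (b + 1); omega
    · show 1 ≤ (a + 1) * (a + 1); omega
    · show altCount ((a + 1) * (a + 1) - 1) + 1 = n + 1; omega
  · -- cube branch
    have hstep : stepN (a + 1, b + 1, el) = (a + 1, b + 1 + 1, (b + 1) * (b + 1) * (b + 1)) := by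
      simp [stepN, hgt, Nat.not_lt.mpr (Nat.le_of_lt hgt)]
    rw [hstep]
    -- b+1 is not a perfect square here (else i-1 < c³ < i)
    have hnotsq : altIsqrt (b + 1) = altIsqrt b := by
      have h1 := (altIsqrt_char b).1
      have h2 := (altIsqrt_char b).2
      apply altIsqrt_eq
      · omega
      · rcases Nat.lt_or_ge (b + 1) ((altIsqrt b + 1) * (altIsqrt b + 1)) with hok | hbad
        · exact hok
        · exfalso
          have hje : b + 1 = (altIsqrt b + 1) * (altIsqrt b + 1) := by omega
          set c := altIsqrt b + 1 with hcdef
          have hcube : (b + 1) * (b + 1) * (b + 1) = (c * c * c) * (c * c * c) := by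
            rw [hje]; ring
          have e1 : a < c * c * c := lt_of_mul_self_lt (by omega)
          have e2 : c * c * c < a + 1 := lt_of_mul_self_lt (by omega)
          omega
    have hprev : altCount ((b + 1) * (b + 1) * (b + 1) - 1) = n := by
      have e := altCount_eq (v := (b + 1) * (b + 1) * (b + 1) - 1) (i := a + 1) (j := b + 1) (by omega) (by omega)
        (by simp only [Nat.add_sub_cancel]; omega) (by omega)
        (by simp only [Nat.add_sub_cancel]; omega) (by omega)
      simp only [Nat.add_sub_cancel] at e
      omega
    refine ⟨?_, ?_, ?_, ?_, ?_, ?_, ?_, Or.inr ⟨?_, ?_⟩⟩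
    · show 1 ≤ a + 1; omega
    · show 1 ≤ b + 1 + 1; omega
    · show a * a ≤ (b + 1) * (b + 1) * (b + 1); omega
    · show (b + 1) * (b + 1) * (b + 1) < (a + 1) * (a + 1); exact hgt
    · show (b + 1) * (b + 1) * (b + 1) ≤ (b + 1) * (b + 1) * (b + 1); exact Nat.le_refl _
    · show (b + 1) * (b + 1) * (b + 1) < (b + 1 + 1) * (b + 1 + 1) * (b + 1 + 1)
      have : (b + 1 + 1) * (b + 1 + 1) * (b + 1 + 1)
          = (b + 1) * (b + 1) * (b + 1) + 3 * ((b + 1) * (b + 1)) + 3 * (b + 1) + 1 := by ring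
      omega
    · show n + 1 + altIsqrt (b + 1) = a + (b + 1); omega
    · show 1 ≤ (b + 1) * (b + 1) * (b + 1); omega
    · show altCount ((b + 1) * (b + 1) * (b + 1) - 1) + 1 = n + 1; omega

theorem invA_all (n : Nat) : InvA n (iterN n) := by
  induction n with
  | zero => exact invA_zero
  | succ n ih => exact invA_step ih

-- ---- specification of B's outer binary search ----
theorem altMainLoop_spec (k : Nat) : ∀ n lo hi : Nat, hi - lo ≤ k →
    altCount lo < n → n ≤ altCount hi → lo < hi →
    n ≤ altCount (altMainLoop n lo hi) ∧ altCount (altMainLoop n lo hi - 1) < n ∧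
      1 ≤ altMainLoop n lo hi := by
  induction k with
  | zero => intro n lo hi hk _ _ hlt; omega
  | succ k ih =>
    intro n lo hi hk h1 h2 hlt
    rw [altMainLoop]
    by_cases h : 1 < hi - lo
    · simp only [if_pos h]
      have hmid1 : lo < (lo + hi) / 2 := by omega
      have hmid2 : (lo + hi) / 2 < hi := by omega
      by_cases hle : n ≤ altCount ((lo + hi) / 2)
      · simp only [if_pos hle]
        exact ih n lo _ (by omega) h1 hle hmid1
      · simp only [if_neg hle]
        exact ih n _ hi (by omega) (by omega) h2 hmid2
    · simp only [if_neg h]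
      have hhi : hi = lo + 1 := by omega
      subst hhi
      refine ⟨h2, ?_, by omega⟩
      simpa using h1

theorem altCount_zero : altCount 0 = 0 := by
  have h1 : altIsqrt 0 = 0 := altIsqrt_eq (by omega) (by omega)
  have h2 : altIcbrt 0 = 0 := altIcbrt_eq (by omega) (by omega)
  simp [altCount, h1, h2]

theorem altCount_sq_ge (n : Nat) : n ≤ altCount (n * n) := by
  have hsq : altIsqrt (n * n) = n := by
    apply altIsqrt_eq (Nat.le_refl _)
    have : (n + 1) * (n + 1) = n * n + 2 * n + 1 := by ring
    omega
  have := altIsqrt_le_self (altIcbrt (n * n))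
  simp only [altCount, hsq]
  omega

-- ---- bridge: A's Int fold equals the Nat model ----
def pvToZ (s : Nat × Nat × Nat) : Int × Int × Int := ((s.1 : Int), (s.2.1 : Int), (s.2.2 : Int))

theorem stepA_pvToZ (s : Nat × Nat × Nat) (c : Int) : stepA (pvToZ s) c = pvToZ (stepN s) := by
  obtain ⟨i, j, el⟩ := s
  have e2 : ((i : Int)) ^ 2 = ((i * i : Nat) : Int) := by push_cast; ring
  have e3 : ((j : Int)) ^ 3 = ((j * j * j : Nat) : Int) := by push_cast; ring
  simp only [stepA, stepN, pvToZ, e2, e3, Nat.cast_lt]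
  by_cases h1 : i * i < j * j * j
  · simp [h1]
  · by_cases h2 : j * j * j < i * i
    · simp [h1, h2]
    · simp [h1, h2]

theorem fold_eq (n : Nat) :
    (PySem.List.pyRange 0 (n : Int) 1).foldl stepA (1, 1, 0) = pvToZ (iterN n) := by
  induction n with
  | zero =>
    rw [show ((0 : Nat) : Int) = 0 from rfl, PySem.List.pyRange_one_eq_nil (by omega)]
    simp [iterN, pvToZ]
  | succ n ih =>
    have hc : ((n + 1 : Nat) : Int) = (n : Int) + 1 := by push_cast; ring
    rw [hc, PySem.List.pyRange_one_succ_right (by omega), List.foldl_append, ih]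
    simp only [List.foldl_cons, List.foldl_nil, iterN]
    exact stepA_pvToZ (iterN n) (n : Int)

-- ===== VERDICT =====
theorem seqEl_spec : Claim_equal_seqEl := by
  intro x _
  unfold Spec_seqEl
  by_cases hx : x ≤ 0
  · rw [seqEl, seqEl_alt, PySem.List.pyRange_one_eq_nil hx, if_pos hx]
    rfl
  · have hx1 : 1 ≤ x := by omega
    have hnx : ((x.toNat : Nat) : Int) = x := Int.toNat_of_nonneg (by omega)
    set n := x.toNat with hn
    have hn1 : 1 ≤ n := by omega
    -- A's result is the Nat model's result
    have hA : seqEl x = ((iterN n).2.2 : Int) := by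
      rw [seqEl, ← hnx, fold_eq]
      rfl
    -- unpack the invariant at step n
    have hinv := invA_all n
    rcases hs : iterN n with ⟨i, j, el⟩
    rw [hs] at hinv hA
    obtain ⟨hi, hj, hs1, hs2, hc1, hc2, heqq, hlast⟩ := hinv
    simp only at hi hj hs1 hs2 hc1 hc2 heqq hlast hA
    have hsle : altIsqrt (j - 1) ≤ j - 1 := altIsqrt_le_self (j - 1)
    have hel : altCount el = n := by
      rw [altCount_eq hi hj hs1 hs2 hc1 hc2]
      omega
    have hel1 : 1 ≤ el ∧ altCount (el - 1) + 1 = n := by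
      rcases hlast with ⟨h0, _⟩ | h
      · omega
      · exact h
    -- B's result
    have hB := altMainLoop_spec (n * n) n 0 (n * n) (by omega)
      (by rw [altCount_zero]; omega) (altCount_sq_ge n) (Nat.mul_pos (by omega) (by omega))
    -- both characterize the least v with n ≤ altCount v
    have hre : altMainLoop n 0 (n * n) = el := by
      rcases Nat.lt_trichotomy (altMainLoop n 0 (n * n)) el with h | h | h
      · have := altCount_mono (show altMainLoop n 0 (n * n) ≤ el - 1 by omega)
        omega
      · exact h
      · have := altCount_mono (show el ≤ altMainLoop n 0 (n * n) - 1 by omega)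
        omega
    rw [hA, seqEl_alt, if_neg hx, ← hn, hre]
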